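-- pv_equiv track=rewrite | github.com/monizyzz/University | 2-year/Algorithmic Laboratory II/Introduction/hacker.py | hacker
-- ===== SOURCE A (Python) =====
-- def hacker(log):
--     dic = {}
--     em = []
--
--     for c,e in log:
--         if e not in log:
--             dic[e] = list(c)
--
--         if e not in em:
--             em.append(e)
--
--     for e in em:
--         for x,y in log:
--             if e == y:
--                 for i,c in enumerate(x):
--                     if c != '*':
--                         dic[e][i] = c
--
--
--     res = sorted(dic.items(), key = lambda x: (x[1].count('*'),x[0]))
--
--     r = [(''.join(y),x) for x,y in res]
--
--     return r
-- ===== SOURCE B (Python) =====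
-- def hacker(log):
--     # One pass: group by identifier, merging masks as we go (last non-'*' char wins per position).
--     merged = {}
--     for c, e in log:
--         old = merged.get(e)
--         if old is None:
--             merged[e] = list(c)
--         else:
--             merged[e] = [n if n != '*' else o for o, n in zip(old, c)]
--     res = sorted(merged.items(), key=lambda kv: (kv[1].count('*'), kv[0]))
--     return [(''.join(chars), e) for e, chars in res]
-- ===== Notes on version B (the rewrite author's own statement) =====
-- stated objective: faster
-- what changed: Replaces A's three scans (a rebuild-the-dict pass with list-membership tests, then a nested per-identifier rescan of the whole log) by ONE pass that groups masks by identifier in a dict and merges each mask into the stored pattern as it arrives; the sort at the end stays.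
-- outside the precondition, e.g. on hacker([('c', 'x'), ('*b', 'x')]): A returns [('cb', 'x')], B returns [('c', 'x')]; on hacker([('ab', 'x'), ('c', 'x')]): A raises IndexError, B returns [('c', 'x')]
import Mathlib
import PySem

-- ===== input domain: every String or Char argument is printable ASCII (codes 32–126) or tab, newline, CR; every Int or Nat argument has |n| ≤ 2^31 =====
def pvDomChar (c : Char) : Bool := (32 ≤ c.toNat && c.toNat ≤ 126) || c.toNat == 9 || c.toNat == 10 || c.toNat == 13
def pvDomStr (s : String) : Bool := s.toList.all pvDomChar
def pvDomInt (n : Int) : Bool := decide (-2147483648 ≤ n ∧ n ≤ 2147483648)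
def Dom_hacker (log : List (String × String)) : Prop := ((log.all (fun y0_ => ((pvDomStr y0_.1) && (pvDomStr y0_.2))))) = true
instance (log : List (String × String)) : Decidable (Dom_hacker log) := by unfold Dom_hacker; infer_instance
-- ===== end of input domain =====

-- B replaces A's three scans (last-wins dict rebuild + nested per-identifier rescan of the log)
-- by one grouping pass that merges each mask into the stored pattern as it arrives (faster).

-- ===== PORT A =====
-- Python's 'e in log' compares the STRING e with (str, str) PAIRS; 'str == tuple' is always
-- False in Python, so this element test is the constant False and 'e not in log' always holds.
def pyEqStrPair (_e : String) (_p : String × String) : Bool := false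

-- 'for i, c in enumerate(x): if c != '*': dic[e][i] = c'.  The index assignment raises
-- IndexError when i ≥ len(dic[e]); Pre_hacker excludes those inputs (here List.set no-ops).
def hackerSetLoop (m : List Char) (x : List Char) : List Char :=
  (PySem.List.enumerate x).foldl
    (fun m ic => if ic.2 ≠ '*' then m.set ic.1.toNat ic.2 else m) m

def hacker (log : List (String × String)) : List (String × String) :=
  let st : PySem.Dict String (List Char) × List String := log.foldl
    (fun st ce =>
      let dic := if !(log.any (pyEqStrPair ce.2)) then st.1.insert ce.2 ce.1.toList else st.1
      let em := if ce.2 ∈ st.2 then st.2 else st.2 ++ [ce.2]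
      (dic, em))
    (PySem.Dict.empty, [])
  -- every e ∈ em is a key of dic (the first loop inserted it), so the in-place mutation of
  -- dic[e] is Dict.modify at key e
  let dic := st.2.foldl
    (fun dic e => log.foldl
      (fun dic xy => if e = xy.2 then dic.modify e [] (fun m => hackerSetLoop m xy.1.toList) else dic)
      dic)
    st.1
  let res := PySem.List.sorted2 dic.items (fun kv => PySem.List.count kv.2 '*') (fun kv => kv.1)
  res.map (fun kv => (String.ofList kv.2, kv.1))

-- ===== PORT B =====
-- '[n if n != '*' else o for o, n in zip(old, c)]'
def mergeMask (old new : List Char) : List Char :=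
  List.zipWith (fun o n => if n ≠ '*' then n else o) old new

def hacker_alt (log : List (String × String)) : List (String × String) :=
  let merged : PySem.Dict String (List Char) := log.foldl
    (fun d ce =>
      match d.get? ce.2 with
      | none => d.insert ce.2 ce.1.toList
      | some old => d.insert ce.2 (mergeMask old ce.1.toList))
    PySem.Dict.empty
  let res := PySem.List.sorted2 merged.items (fun kv => PySem.List.count kv.2 '*') (fun kv => kv.1)
  res.map (fun kv => (String.ofList kv.2, kv.1))

-- ===== PRECONDITION & SPEC =====
-- Pre_ excludes logs in which two entries share an identifier but their masks have different
-- lengths: no merge semantics is specified there, and A either raises IndexError or returns a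
-- value that depends on which mask happens to come last, while B's zip silently truncates.
def Pre_hacker (log : List (String × String)) : Prop :=
  ∀ p ∈ log, ∀ q ∈ log, p.2 = q.2 → p.1.toList.length = q.1.toList.length
instance (log : List (String × String)) : Decidable (Pre_hacker log) := by
  unfold Pre_hacker; infer_instance

def pvWitness_hacker : (List (String × String)) :=
  [("a*c", "u"), ("*b*", "u"), ("x", "v")]

def Spec_hacker (log : List (String × String)) (out : List (String × String)) : Prop := out = hacker_alt log
instance (log : List (String × String)) (out : List (String × String)) : Decidable (Spec_hacker log out) := by unfold Spec_hacker; infer_instance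

-- ===== CLAIM (what is proved, stated in full; the proofs are below) =====
def Claim_equal_hacker : Prop := ∀ (log : List (String × String)), Dom_hacker log → Pre_hacker log → Spec_hacker log (hacker log)

-- ===== LEMMAS AND PROOFS =====

-- first-occurrence list of identifiers
def hkIds (log : List (String × String)) : List String := PySem.Set.ofList (log.map (·.2))

-- the masks recorded for identifier e, in log order
def hkCols (log : List (String × String)) (e : String) : List (List Char) :=
  (log.filter (fun p => p.2 == e)).map (fun p => p.1.toList)

-- B's merged value for one identifier
def hkMergeFold : List (List Char) → List Char
  | [] => []
  | c :: r => r.foldl mergeMask c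

theorem hkIds_append (log : List (String × String)) (p : String × String) :
    hkIds (log ++ [p]) = if p.2 ∈ hkIds log then hkIds log else hkIds log ++ [p.2] := by
  simp only [hkIds, PySem.Set.ofList, List.map_append, List.foldl_append, List.map_cons,
    List.map_nil, List.foldl_cons, List.foldl_nil]
  show PySem.Set.add _ _ = _
  simp only [PySem.Set.add, PySem.Set.contains, List.contains_eq_mem]
  split_ifs with h h2 h2 <;> simp_all

theorem mem_hkIds (log : List (String × String)) (e : String) :
    e ∈ hkIds log ↔ e ∈ log.map (·.2) := PySem.Set.mem_ofList _ _

theorem hkCols_append (log : List (String × String)) (p : String × String) (e : String) :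
    hkCols (log ++ [p]) e
      = hkCols log e ++ (if p.2 = e then [p.1.toList] else []) := by
  simp only [hkCols, List.filter_append, List.map_append]
  congr 1
  by_cases h : p.2 = e <;> simp [h]

theorem hkCols_ne_nil (log : List (String × String)) (e : String) (h : e ∈ hkIds log) :
    hkCols log e ≠ [] := by
  rw [mem_hkIds] at h
  rcases List.mem_map.mp h with ⟨p, hp, rfl⟩
  have : p ∈ log.filter (fun q => q.2 == p.2) := List.mem_filter.mpr ⟨hp, by simp⟩
  simp only [hkCols, ne_eq, List.map_eq_nil_iff]
  intro hnil
  rw [hnil] at this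
  cases this

theorem hkMergeFold_append (cs : List (List Char)) (x : List Char) (h : cs ≠ []) :
    hkMergeFold (cs ++ [x]) = mergeMask (hkMergeFold cs) x := by
  match cs with
  | c :: r => simp [hkMergeFold, List.foldl_append]

theorem mapd_get? (ks : List String) (v : String → List Char) (k : String) :
    (PySem.Dict.mk (ks.map (fun e => (e, v e)))).get? k
      = if k ∈ ks then some (v k) else none := by
  induction ks with
  | nil => simp [PySem.Dict.get?]
  | cons a t ih =>
    by_cases h : k = a
    · subst h; simp [PySem.Dict.get?]
    · have hba : (a == k) = false := by simp [Ne.symm h]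
      simp only [PySem.Dict.get?, List.map_cons, List.find?_cons, hba] at *
      simpa [h] using ih

theorem mapd_contains (ks : List String) (v : String → List Char) (k : String) :
    (PySem.Dict.mk (ks.map (fun e => (e, v e)))).contains k = decide (k ∈ ks) := by
  simp only [PySem.Dict.contains, List.any_map]
  by_cases h : k ∈ ks
  · simp only [h, decide_true]
    exact List.any_eq_true.mpr ⟨k, h, by simp⟩
  · simp only [h, decide_false]
    rw [List.any_eq_false]
    intro e he
    simp only [Function.comp_apply]
    intro hh
    exact h ((eq_of_beq hh) ▸ he)

theorem mapd_insert (ks : List String) (v : String → List Char) (k : String) (w : List Char) :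
    (PySem.Dict.mk (ks.map (fun e => (e, v e)))).insert k w
      = PySem.Dict.mk ((if k ∈ ks then ks else ks ++ [k]).map
          (fun e => (e, if e = k then w else v e))) := by
  by_cases h : k ∈ ks
  · simp only [PySem.Dict.insert, mapd_contains, h, decide_true, if_true]
    congr 1
    rw [List.map_map]
    apply List.map_congr_left
    intro e _
    by_cases he : e = k <;> simp [he, beq_iff_eq]
  · simp only [PySem.Dict.insert, mapd_contains, h, decide_false, if_false,
      Bool.false_eq_true, List.map_append]
    congr 1
    refine congrArg₂ (fun (x y : List (String × List Char)) => x ++ y) ?_ ?_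
    · apply List.map_congr_left
      intro e hek
      have : e ≠ k := fun hh => h (hh ▸ hek)
      simp [this]
    · simp

theorem modify_modify (d : PySem.Dict String (List Char)) (k : String) (dflt : List Char)
    (f g : List Char → List Char) :
    (d.modify k dflt f).modify k dflt g = d.modify k dflt (fun m => g (f m)) := by
  show (d.modify k dflt f).insert k (g ((d.modify k dflt f).getD k dflt)) = _
  rw [PySem.Dict.getD_modify_self]
  show ((d.insert k (f (d.getD k dflt))).insert k (g (f (d.getD k dflt)))) = _
  rw [PySem.Dict.insert_insert_self]
  rfl

theorem foldl_modify_comp (x : List Char) (l : List (List Char)) (k : String)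
    (g : List Char → List Char → List Char) (d : PySem.Dict String (List Char)) :
    (x :: l).foldl (fun d y => d.modify k [] (fun m => g m y)) d
      = d.modify k [] (fun m => (x :: l).foldl g m) := by
  induction l generalizing x d with
  | nil => rfl
  | cons y rest ih =>
    show (y :: rest).foldl _ (d.modify k [] (fun m => g m x)) = _
    rw [ih, modify_modify]
    congr 1

theorem foldl_keys_update (ks : List String) (F : String → List Char → List Char) :
    ∀ (todo : List String) (v : String → List Char),
      todo.Nodup → (∀ k ∈ todo, k ∈ ks) →
      todo.foldl (fun (d : PySem.Dict String (List Char)) e =>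
          d.modify e [] (fun m => F e m))
        (PySem.Dict.mk (ks.map (fun e => (e, v e))))
      = PySem.Dict.mk (ks.map (fun e => (e, if e ∈ todo then F e (v e) else v e))) := by
  intro todo
  induction todo with
  | nil => intro v _ _; simp
  | cons t rest ih =>
    intro v hnd hsub
    have ht : t ∈ ks := hsub t (by simp)
    have step : (PySem.Dict.mk (ks.map (fun e => (e, v e)))).modify t [] (fun m => F t m)
        = PySem.Dict.mk (ks.map (fun e => (e, if e = t then F t (v t) else v e))) := by
      show (PySem.Dict.mk (ks.map (fun e => (e, v e)))).insert t
          (F t ((PySem.Dict.mk (ks.map (fun e => (e, v e)))).getD t [])) = _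
      have : (PySem.Dict.mk (ks.map (fun e => (e, v e)))).getD t [] = v t := by
        simp [PySem.Dict.getD, mapd_get?, ht]
      rw [this, mapd_insert, if_pos ht]
    rw [List.foldl_cons, step,
      ih (fun e => if e = t then F t (v t) else v e) hnd.of_cons
        (fun k hk => hsub k (List.mem_cons_of_mem _ hk))]
    congr 1
    apply List.map_congr_left
    intro e _
    by_cases het : e = t
    · subst het
      have : e ∉ rest := (List.nodup_cons.mp hnd).1
      simp [this]
    · simp [het, List.mem_cons]

theorem len_setFold (l : List (Int × Char)) (m : List Char) :
    (l.foldl (fun m ic => if ic.2 ≠ '*' then m.set ic.1.toNat ic.2 else m) m).length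
      = m.length := by
  induction l generalizing m with
  | nil => rfl
  | cons p t ih =>
    simp only [List.foldl_cons]
    by_cases h : p.2 ≠ '*'
    · rw [if_pos h, ih, List.length_set]
    · rw [if_neg h, ih]

theorem len_setLoop (m x : List Char) : (hackerSetLoop m x).length = m.length :=
  len_setFold _ m

theorem setLoop_append (m x : List Char) (c : Char) :
    hackerSetLoop m (x ++ [c])
      = if c ≠ '*' then (hackerSetLoop m x).set x.length c else hackerSetLoop m x := by
  unfold hackerSetLoop
  rw [PySem.List.enumerate_append, List.foldl_append]
  simp [PySem.List.enumerate]

theorem setLoop_getD (x m : List Char) (hx : x.length ≤ m.length) (i : Nat) (d : Char) :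
    (hackerSetLoop m x).getD i d
      = if i < x.length ∧ x.getD i '*' ≠ '*' then x.getD i '*' else m.getD i d := by
  induction x using List.reverseRecOn with
  | nil => simp [hackerSetLoop, PySem.List.enumerate]
  | append_singleton t c ih =>
    have ht : t.length ≤ m.length := by simp at hx; omega
    have hlen : (t ++ [c]).length = t.length + 1 := by simp
    rw [setLoop_append]
    by_cases hc : c ≠ '*'
    · rw [if_pos hc]
      by_cases hi : i = t.length
      · subst hi
        have hlt : t.length < (hackerSetLoop m t).length := by
          rw [len_setLoop]; simp at hx; omega
        rw [List.getD_eq_getElem _ _ (by simpa using hlt), List.getElem_set_self]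
        have e1 : (t ++ [c]).getD t.length '*' = c := by
          rw [List.getD_append_right _ _ _ _ (le_refl _)]; simp
        rw [e1, if_pos ⟨by omega, hc⟩]
      · have hset : ((hackerSetLoop m t).set t.length c).getD i d
            = (hackerSetLoop m t).getD i d := by
          rw [List.getD_eq_getElem?_getD, List.getD_eq_getElem?_getD,
            List.getElem?_set_ne (fun hh => hi hh.symm)]
        rw [hset, ih ht]
        by_cases hit : i < t.length
        · rw [List.getD_append _ _ _ _ hit]
          by_cases hstar : t.getD i '*' = '*'
          · rw [if_neg (by tauto), if_neg (by tauto)]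
          · rw [if_pos ⟨hit, hstar⟩, if_pos ⟨by omega, hstar⟩]
        · rw [if_neg (by tauto), if_neg (by rw [hlen]; intro ⟨ha, _⟩; omega)]
    · rw [if_neg hc]
      have hcc : c = '*' := by simpa using hc
      subst hcc
      rw [ih ht]
      by_cases hit : i < t.length
      · rw [List.getD_append _ _ _ _ hit]
        by_cases hstar : t.getD i '*' = '*'
        · rw [if_neg (by tauto), if_neg (by tauto)]
        · rw [if_pos ⟨hit, hstar⟩, if_pos ⟨by omega, hstar⟩]
      · rw [if_neg (by tauto)]
        by_cases hi : i = t.length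
        · subst hi
          have e1 : (t ++ ['*']).getD t.length '*' = '*' := by
            rw [List.getD_append_right _ _ _ _ (le_refl _)]; simp
          rw [if_neg (by rw [e1]; tauto)]
        · rw [if_neg (by rw [hlen]; intro ⟨ha, _⟩; omega)]

theorem len_mergeMask (m x : List Char) : (mergeMask m x).length = min m.length x.length := by
  simp [mergeMask]

theorem mergeMask_getD (x m : List Char) (hx : x.length = m.length) (i : Nat) (d : Char) :
    (mergeMask m x).getD i d
      = if i < x.length ∧ x.getD i '*' ≠ '*' then x.getD i '*' else m.getD i d := by
  by_cases hi : i < x.length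
  · have him : i < m.length := by omega
    have hiz : i < (mergeMask m x).length := by rw [len_mergeMask]; omega
    rw [List.getD_eq_getElem _ _ hiz,
      show x.getD i '*' = x[i] from List.getD_eq_getElem _ _ hi,
      show m.getD i d = m[i] from List.getD_eq_getElem _ _ him]
    simp only [mergeMask, List.getElem_zipWith]
    by_cases hc : x[i] = '*'
    · simp [hc, hi]
    · simp [hc, hi]
  · rw [if_neg (by tauto), List.getD_eq_default _ _ (by rw [len_mergeMask]; omega),
      List.getD_eq_default _ _ (by omega)]

theorem setLoop_eq_mergeMask (m x : List Char) (hx : x.length = m.length) :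
    hackerSetLoop m x = mergeMask m x := by
  apply List.ext_getElem
  · rw [len_setLoop, len_mergeMask]; omega
  · intro i h1 h2
    rw [← List.getD_eq_getElem _ '*' h1, ← List.getD_eq_getElem _ '*' h2,
      setLoop_getD x m (by omega) i '*', mergeMask_getD x m hx i '*']

theorem mergeFold_congr (cs : List (List Char)) (L : Nat) :
    ∀ b₁ b₂ : List Char, b₁.length = L → b₂.length = L → (∀ m ∈ cs, m.length = L) →
    (∀ i, i < L → b₁.getD i '*' = b₂.getD i '*' ∨ ∃ m ∈ cs, m.getD i '*' ≠ '*') →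
    cs.foldl mergeMask b₁ = cs.foldl mergeMask b₂ := by
  induction cs with
  | nil =>
    intro b₁ b₂ h1 h2 _ hpt
    simp only [List.foldl_nil]
    apply List.ext_getElem (by omega)
    intro i hi1 hi2
    rw [← List.getD_eq_getElem _ '*' hi1, ← List.getD_eq_getElem _ '*' hi2]
    rcases hpt i (by omega) with h | ⟨m, hm, _⟩
    · exact h
    · cases hm
  | cons x t ih =>
    intro b₁ b₂ h1 h2 hlen hpt
    have hxL : x.length = L := hlen x (by simp)
    simp only [List.foldl_cons]
    apply ih (mergeMask b₁ x) (mergeMask b₂ x)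
      (by rw [len_mergeMask]; omega) (by rw [len_mergeMask]; omega)
      (fun m hm => hlen m (by simp [hm]))
    intro i hi
    by_cases hc : i < x.length ∧ x.getD i '*' ≠ '*'
    · left
      rw [mergeMask_getD x b₁ (by omega) i '*', mergeMask_getD x b₂ (by omega) i '*',
        if_pos hc, if_pos hc]
    · rw [mergeMask_getD x b₁ (by omega) i '*', mergeMask_getD x b₂ (by omega) i '*',
        if_neg hc, if_neg hc]
      rcases hpt i hi with h | ⟨m, hm, hms⟩
      · exact Or.inl h
      · rcases List.mem_cons.mp hm with rfl | hmt
        · exact absurd ⟨by omega, hms⟩ hc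
        · exact Or.inr ⟨m, hmt, hms⟩

theorem fold_from_last (cs : List (List Char)) (L : Nat) (hne : cs ≠ [])
    (hlen : ∀ m ∈ cs, m.length = L) :
    cs.foldl mergeMask (cs.getLastD []) = hkMergeFold cs := by
  match cs with
  | c :: r =>
    have hlast : (c :: r).getLastD [] = (c :: r).getLast (by simp) := by
      rw [List.getLastD_eq_getLast?, List.getLast?_eq_some_getLast (by simp)]
      rfl
    have hmem : (c :: r).getLast (by simp) ∈ c :: r := List.getLast_mem _
    have hlastL : ((c :: r).getLastD []).length = L := by
      rw [hlast]; exact hlen _ hmem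
    have hcL : c.length = L := hlen c (by simp)
    show (c :: r).foldl mergeMask ((c :: r).getLastD []) = r.foldl mergeMask c
    simp only [List.foldl_cons]
    apply mergeFold_congr r L (mergeMask ((c :: r).getLastD []) c) c
      (by rw [len_mergeMask]; omega) hcL
      (fun m hm => hlen m (by simp [hm]))
    intro i hi
    rw [mergeMask_getD c _ (by omega) i '*']
    by_cases hc : i < c.length ∧ c.getD i '*' ≠ '*'
    · rw [if_pos hc]; exact Or.inl rfl
    · rw [if_neg hc]
      by_cases hl : ((c :: r).getLastD []).getD i '*' = '*'
      · left
        rw [hl]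
        rcases Decidable.em (i < c.length) with hic | hic
        · have : c.getD i '*' = '*' := by
            by_contra hh; exact hc ⟨hic, hh⟩
          exact this.symm
        · rw [List.getD_eq_default _ _ (by omega)]
      · rcases List.mem_cons.mp (hlast ▸ hmem) with hcc | hmt
        · exfalso
          apply hl
          rw [hlast] at *
          rw [hcc] at *
          by_contra hh
          exact hc ⟨by omega, hh⟩
        · right
          exact ⟨_, hlast ▸ hmt, hl⟩

theorem fold_setLoop_eq_fold_mergeMask (cs : List (List Char)) (L : Nat) :
    ∀ b : List Char, b.length = L → (∀ m ∈ cs, m.length = L) →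
    cs.foldl hackerSetLoop b = cs.foldl mergeMask b := by
  induction cs with
  | nil => intro b _ _; rfl
  | cons x t ih =>
    intro b hb hlen
    have hxL : x.length = L := hlen x (by simp)
    simp only [List.foldl_cons]
    rw [setLoop_eq_mergeMask b x (by omega)]
    exact ih (mergeMask b x) (by rw [len_mergeMask]; omega)
      (fun m hm => hlen m (by simp [hm]))

theorem bfold_items (log : List (String × String)) :
    log.foldl
      (fun (d : PySem.Dict String (List Char)) ce =>
        match d.get? ce.2 with
        | none => d.insert ce.2 ce.1.toList
        | some old => d.insert ce.2 (mergeMask old ce.1.toList))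
      PySem.Dict.empty
    = PySem.Dict.mk ((hkIds log).map (fun e => (e, hkMergeFold (hkCols log e)))) := by
  induction log using List.reverseRecOn with
  | nil => rfl
  | append_singleton t p ih =>
    rw [List.foldl_append, List.foldl_cons, List.foldl_nil, ih]
    by_cases h : p.2 ∈ hkIds t
    · rw [mapd_get?]
      simp only [h, if_true]
      rw [mapd_insert, if_pos h, hkIds_append, if_pos h]
      congr 1
      apply List.map_congr_left
      intro e he
      by_cases hep : e = p.2
      · subst hep
        rw [if_pos rfl, hkCols_append, if_pos rfl,
          hkMergeFold_append _ _ (hkCols_ne_nil t p.2 h)]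
      · rw [if_neg hep, hkCols_append, if_neg (fun hh => hep hh.symm), List.append_nil]
    · rw [mapd_get?]
      simp only [h, if_false]
      rw [mapd_insert, if_neg h, hkIds_append, if_neg h]
      congr 1
      apply List.map_congr_left
      intro e he
      rcases List.mem_append.mp he with het | hep
      · have hep : e ≠ p.2 := fun hh => h (hh ▸ het)
        rw [if_neg hep, hkCols_append, if_neg (fun hh => hep hh.symm), List.append_nil]
      · have hep : e = p.2 := by simpa using hep
        subst hep
        rw [if_pos rfl, hkCols_append, if_pos rfl]
        have : hkCols t p.2 = [] := by
          by_contra hh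
          apply h
          rw [mem_hkIds]
          rcases List.exists_mem_of_ne_nil _ hh with ⟨m, hm⟩
          rcases List.mem_map.mp hm with ⟨q, hq, _⟩
          have hqf := List.mem_filter.mp hq
          exact List.mem_map.mpr ⟨q, hqf.1, by simpa using hqf.2⟩
        rw [this]
        rfl

theorem adic_items (log : List (String × String)) :
    log.foldl
      (fun (d : PySem.Dict String (List Char)) ce => d.insert ce.2 ce.1.toList)
      PySem.Dict.empty
    = PySem.Dict.mk ((hkIds log).map (fun e => (e, (hkCols log e).getLastD []))) := by
  induction log using List.reverseRecOn with
  | nil => rfl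
  | append_singleton t p ih =>
    rw [List.foldl_append, List.foldl_cons, List.foldl_nil, ih, mapd_insert, hkIds_append]
    by_cases h : p.2 ∈ hkIds t
    · rw [if_pos h]
      congr 1
      apply List.map_congr_left
      intro e he
      by_cases hep : e = p.2
      · subst hep
        rw [if_pos rfl, hkCols_append, if_pos rfl, List.getLastD_concat]
      · rw [if_neg hep, hkCols_append, if_neg (fun hh => hep hh.symm), List.append_nil]
    · rw [if_neg h]
      congr 1
      apply List.map_congr_left
      intro e he
      by_cases hep : e = p.2
      · subst hep
        rw [if_pos rfl, hkCols_append, if_pos rfl, List.getLastD_concat]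
      · rw [if_neg hep, hkCols_append, if_neg (fun hh => hep hh.symm), List.append_nil]

theorem em_eq_hkIds (log : List (String × String)) :
    log.foldl (fun (em : List String) ce => if ce.2 ∈ em then em else em ++ [ce.2]) []
      = hkIds log := by
  rw [hkIds, PySem.Set.ofList, List.foldl_map]
  apply PySem.List.foldl_congr_mem
  intro acc x _
  simp only [PySem.Set.add, PySem.Set.contains, List.contains_eq_mem]
  split_ifs with h h2 h2 <;> simp_all

theorem inner_filter_fold (e : String) {l : List (String × String)}
    {d : PySem.Dict String (List Char)} :
    l.foldl (fun d xy =>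
        if e = xy.2 then d.modify e [] (fun m => hackerSetLoop m xy.1.toList) else d) d
      = (hkCols l e).foldl (fun d y => d.modify e [] (fun m => hackerSetLoop m y)) d := by
  induction l generalizing d with
  | nil => rfl
  | cons q t ih =>
    by_cases hq : e = q.2
    · have : (q.2 == e) = true := by simp [hq]
      simp only [hkCols, List.filter_cons, this, if_true, List.map_cons, List.foldl_cons,
        if_pos hq]
      exact ih
    · have : (q.2 == e) = false := by simp [Ne.symm hq]
      simp only [hkCols, List.filter_cons, this, List.foldl_cons, if_neg hq]
      simpa [hkCols] using ih

theorem hacker_eq_alt (log : List (String × String)) (hpre : Pre_hacker log) :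
    hacker log = hacker_alt log := by
  have hany : ∀ e, log.any (pyEqStrPair e) = false := by
    intro e; simp [pyEqStrPair]
  unfold hacker hacker_alt
  rw [bfold_items]
  simp only [hany, Bool.not_false, if_true]
  have hsplit := PySem.List.foldl_prod_mk
    (f := fun (d : PySem.Dict String (List Char)) (ce : String × String) =>
      d.insert ce.2 ce.1.toList)
    (g := fun (em : List String) (ce : String × String) =>
      if ce.2 ∈ em then em else em ++ [ce.2])
    log PySem.Dict.empty ([] : List String)
  simp only [hsplit, adic_items, em_eq_hkIds]
  have hnd : (hkIds log).Nodup := PySem.Set.nodup_ofList _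
  have inner : ∀ (d : PySem.Dict String (List Char)) e, e ∈ hkIds log →
      log.foldl (fun d xy =>
        if e = xy.2 then d.modify e [] (fun m => hackerSetLoop m xy.1.toList) else d) d
      = d.modify e [] (fun m => (hkCols log e).foldl hackerSetLoop m) := by
    intro d e he
    rw [inner_filter_fold]
    rcases hne : hkCols log e with _ | ⟨x, l⟩
    · exact absurd hne (hkCols_ne_nil log e he)
    · exact foldl_modify_comp x l e _ d
  have houter : (hkIds log).foldl
      (fun dic e => log.foldl (fun dic xy =>
        if e = xy.2 then dic.modify e [] (fun m => hackerSetLoop m xy.1.toList) else dic) dic)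
      (PySem.Dict.mk ((hkIds log).map (fun e => (e, (hkCols log e).getLastD []))))
      = (hkIds log).foldl
      (fun dic e => dic.modify e [] (fun m => (hkCols log e).foldl hackerSetLoop m))
      (PySem.Dict.mk ((hkIds log).map (fun e => (e, (hkCols log e).getLastD [])))) :=
    PySem.List.foldl_congr_mem _ _ _ _ (fun acc x hx => inner acc x hx)
  rw [houter, foldl_keys_update (hkIds log) _ (hkIds log) _ hnd (fun k hk => hk)]
  -- the two dicts now agree key for key
  have hitems : (hkIds log).map (fun e =>
      (e, if e ∈ hkIds log
            then (hkCols log e).foldl hackerSetLoop ((hkCols log e).getLastD [])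
            else (hkCols log e).getLastD []))
      = (hkIds log).map (fun e => (e, hkMergeFold (hkCols log e))) := by
    apply List.map_congr_left
    intro e he
    rw [if_pos he]
    have hne := hkCols_ne_nil log e he
    have hlast : (hkCols log e).getLastD [] ∈ hkCols log e := by
      rw [List.getLastD_eq_getLast?, List.getLast?_eq_some_getLast hne]
      exact List.getLast_mem hne
    have hlen : ∀ m ∈ hkCols log e, m.length = ((hkCols log e).getLastD []).length := by
      intro m hm
      rcases List.mem_map.mp hm with ⟨p, hp, rfl⟩
      rcases List.mem_map.mp hlast with ⟨q, hq, hqv⟩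
      have hp' := List.mem_filter.mp hp
      have hq' := List.mem_filter.mp hq
      rw [← hqv]
      exact hpre p hp'.1 q hq'.1 (by
        have h1 := hp'.2; have h2 := hq'.2; simp_all)
    rw [fold_setLoop_eq_fold_mergeMask (hkCols log e) ((hkCols log e).getLastD []).length
        _ rfl hlen,
      fold_from_last (hkCols log e) ((hkCols log e).getLastD []).length hne hlen]
  rw [hitems]

-- ===== VERDICT (by name: the statement is the Claim_ definition above) =====
theorem hacker_spec : Claim_equal_hacker := by
  intro log _ hpre
  unfold Spec_hacker
  exact hacker_eq_alt log hpre
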